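-- pv_equiv track=rewrite | github.com/nomnomeriii/FamilyLawAgent | family_law_agent/procedure_schema.py | split_service_and_attachments
-- ===== SOURCE A (Python) =====
-- from typing import Any, Dict, Iterable, List, Optional
--
-- def dedup_keep_order(items: Iterable[str], limit: int = 12) -> List[str]:
--     out: List[str] = []
--     seen = set()
--     for item in items:
--         val = " ".join(str(item or "").strip().split())
--         if not val:
--             continue
--         key = val.lower()
--         if key in seen:
--             continue
--         seen.add(key)
--         out.append(val)
--         if len(out) >= limit:
--             break
--     return out
--
-- def split_service_and_attachments(items: Iterable[str]) -> tuple[List[str], List[str]]: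
--     service: List[str] = []
--     attachments: List[str] = []
--     for item in items:
--         lowered = item.lower()
--         if any(word in lowered for word in ["serve", "service", "affidavit of service", "hearing", "file"]):
--             service.append(item)
--         if any(word in lowered for word in ["attach", "exhibit", "document", "copy", "proof", "record", "evidence"]):
--             attachments.append(item)
--     return dedup_keep_order(service), dedup_keep_order(attachments)
-- ===== SOURCE B (Python) =====
-- from typing import Iterable, List
--
-- _SERVICE_WORDS = ["serve", "service", "affidavit of service", "hearing", "file"]
-- _ATTACH_WORDS = ["attach", "exhibit", "document", "copy", "proof", "record", "evidence"]
--
--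
-- def _normalize(item) -> str:
--     return " ".join(str(item or "").strip().split())
--
--
-- def _bucket_step(item, matched, out, seen, full):
--     # dedup-insert the normalized item into one bucket; returns the bucket's new full flag
--     if full or not matched:
--         return full
--     val = _normalize(item)
--     if not val:
--         return full
--     key = val.lower()
--     if key in seen:
--         return full
--     seen.add(key)
--     out.append(val)
--     return len(out) >= 12
--
--
-- def split_service_and_attachments(items: Iterable[str]) -> tuple[List[str], List[str]]:
--     service: List[str] = []
--     attachments: List[str] = []
--     seen_s, seen_a = set(), set()
--     s_full = a_full = False
--     for item in items:
--         lowered = item.lower()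
--         s_full = _bucket_step(item, any(w in lowered for w in _SERVICE_WORDS), service, seen_s, s_full)
--         a_full = _bucket_step(item, any(w in lowered for w in _ATTACH_WORDS), attachments, seen_a, a_full)
--         if s_full and a_full:
--             break
--     return service, attachments
-- ===== Notes on version B (the rewrite author's own statement) =====
-- stated objective: alternative
-- what changed: B fuses A's classify pass and the two subsequent dedup_keep_order passes into a single streaming loop over the input that maintains both buckets, both lowercase-key seen-sets and both 12-limit full flags at once, breaking only when both buckets are full, instead of building two intermediate classified lists and deduplicating each afterwards.
import Mathlib
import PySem

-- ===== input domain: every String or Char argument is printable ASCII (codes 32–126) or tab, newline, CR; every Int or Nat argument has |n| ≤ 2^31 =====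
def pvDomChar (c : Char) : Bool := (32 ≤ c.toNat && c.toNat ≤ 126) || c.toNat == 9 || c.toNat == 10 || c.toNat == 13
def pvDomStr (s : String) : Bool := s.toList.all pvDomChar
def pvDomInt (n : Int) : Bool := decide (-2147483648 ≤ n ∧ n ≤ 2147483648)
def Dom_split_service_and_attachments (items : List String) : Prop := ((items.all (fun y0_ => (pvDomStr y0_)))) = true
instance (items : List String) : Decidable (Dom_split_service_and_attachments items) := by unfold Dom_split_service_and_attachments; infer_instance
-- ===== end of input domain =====

-- B fuses A's classify pass plus the two dedup passes into one streaming loop (two buckets, two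
-- seen-sets, two full flags); objective: alternative single-pass decomposition, same result.

-- ===== PORT A =====

-- dedup_keep_order's loop; for a string argument `str(item or "")` is `item` itself ("" stays ""),
-- so the normalization is exactly " ".join(item.strip().split())
def dkoLoop : List String → List String → PySem.Set String → Int → List String
  | [], out, _, _ => out
  | item :: rest, out, seen, limit =>
    let val := PySem.Str.join " " (PySem.Str.split₀ (PySem.Str.strip item))
    if val = "" then dkoLoop rest out seen limit
    else
      let key := PySem.Str.lower val
      if PySem.Set.contains seen key then dkoLoop rest out seen limit
      else
        let out' := out ++ [val]
        if limit ≤ (out'.length : Int) then out'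
        else dkoLoop rest out' (PySem.Set.add seen key) limit

def dedup_keep_order (items : List String) (limit : Int) : List String :=
  dkoLoop items [] PySem.Set.empty limit

-- the body of A's classify loop
def classifyStep (acc : List String × List String) (item : String) : List String × List String :=
  let lowered := PySem.Str.lower item
  let acc1 := if (["serve", "service", "affidavit of service", "hearing", "file"] : List String).any
      (fun word => PySem.Str.isIn word lowered) then (acc.1 ++ [item], acc.2) else acc
  if (["attach", "exhibit", "document", "copy", "proof", "record", "evidence"] : List String).any
      (fun word => PySem.Str.isIn word lowered) then (acc1.1, acc1.2 ++ [item]) else acc1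

def split_service_and_attachments (items : List String) : List String × List String :=
  let p := items.foldl classifyStep ([], [])
  (dedup_keep_order p.1 12, dedup_keep_order p.2 12)

-- ===== PORT B =====

def serviceWords : List String := ["serve", "service", "affidavit of service", "hearing", "file"]
def attachWords : List String := ["attach", "exhibit", "document", "copy", "proof", "record", "evidence"]

def normalizeB (item : String) : String :=
  PySem.Str.join " " (PySem.Str.split₀ (PySem.Str.strip item))

-- _bucket_step: dedup-insert the normalized item into one bucket; returns (bucket, seen, full flag)
def bucketStep (item : String) (matched : Bool) (out : List String) (seen : PySem.Set String)
    (full : Bool) : List String × PySem.Set String × Bool :=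
  if full || !matched then (out, seen, full)
  else
    let val := normalizeB item
    if val = "" then (out, seen, full)
    else
      let key := PySem.Str.lower val
      if PySem.Set.contains seen key then (out, seen, full)
      else (out ++ [val], PySem.Set.add seen key, decide ((12 : Int) ≤ ((out ++ [val]).length : Int)))

def fuseLoop (items : List String) (service : List String) (seenS : PySem.Set String) (sFull : Bool)
    (attachments : List String) (seenA : PySem.Set String) (aFull : Bool) :
    List String × List String :=
  match items with
  | [] => (service, attachments)
  | item :: rest =>
    let lowered := PySem.Str.lower item
    let r1 := bucketStep item (serviceWords.any (fun w => PySem.Str.isIn w lowered)) service seenS sFull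
    let r2 := bucketStep item (attachWords.any (fun w => PySem.Str.isIn w lowered)) attachments seenA aFull
    if r1.2.2 && r2.2.2 then (r1.1, r2.1)
    else fuseLoop rest r1.1 r1.2.1 r1.2.2 r2.1 r2.2.1 r2.2.2

def split_service_and_attachments_alt (items : List String) : List String × List String :=
  fuseLoop items [] PySem.Set.empty false [] PySem.Set.empty false

-- ===== PRECONDITION & SPEC =====
def Spec_split_service_and_attachments (items : List String) (out : List String × List String) : Prop := out = split_service_and_attachments_alt items
instance (items : List String) (out : List String × List String) : Decidable (Spec_split_service_and_attachments items out) := by unfold Spec_split_service_and_attachments; infer_instance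

-- ===== CLAIM (what is proved, stated in full; the proofs are below) =====
def Claim_equal_split_service_and_attachments : Prop := ∀ (items : List String), Dom_split_service_and_attachments items → Spec_split_service_and_attachments items (split_service_and_attachments items)

-- ===== LEMMAS AND PROOFS =====

def matchS (item : String) : Bool :=
  serviceWords.any (fun w => PySem.Str.isIn w (PySem.Str.lower item))

def matchA (item : String) : Bool :=
  attachWords.any (fun w => PySem.Str.isIn w (PySem.Str.lower item))

theorem classifyStep_eq (acc : List String × List String) (item : String) :
    classifyStep acc item =
      ((if matchS item then acc.1 ++ [item] else acc.1),
       (if matchA item then acc.2 ++ [item] else acc.2)) := by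
  simp only [classifyStep, matchS, matchA, serviceWords, attachWords]
  split_ifs <;> simp_all

-- A's classify pass collects precisely the two filtered sublists
theorem classify_eq (items : List String) (s a : List String) :
    items.foldl classifyStep (s, a) = (s ++ items.filter matchS, a ++ items.filter matchA) := by
  induction items generalizing s a with
  | nil => simp
  | cons item rest ih =>
    rw [List.foldl_cons, classifyStep_eq]
    simp only [List.filter_cons]
    cases hS : matchS item <;> cases hA : matchA item <;>
      simp [ih, List.append_assoc]

theorem dkoLoop_cons (item : String) (rest out : List String) (seen : PySem.Set String)
    (limit : Int) :
    dkoLoop (item :: rest) out seen limit =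
      (if normalizeB item = "" then dkoLoop rest out seen limit
       else if PySem.Set.contains seen (PySem.Str.lower (normalizeB item)) then
         dkoLoop rest out seen limit
       else if limit ≤ ((out ++ [normalizeB item]).length : Int) then out ++ [normalizeB item]
       else dkoLoop rest (out ++ [normalizeB item])
         (PySem.Set.add seen (PySem.Str.lower (normalizeB item))) limit) := by
  rw [dkoLoop, normalizeB]

theorem bucketStep_true (item : String) (out : List String) (seen : PySem.Set String) :
    bucketStep item true out seen false =
      (if normalizeB item = "" then (out, seen, false)
       else if PySem.Set.contains seen (PySem.Str.lower (normalizeB item)) then (out, seen, false)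
       else (out ++ [normalizeB item], PySem.Set.add seen (PySem.Str.lower (normalizeB item)),
         decide ((12 : Int) ≤ ((out ++ [normalizeB item]).length : Int)))) := by
  rw [bucketStep]
  simp

-- one bucket of B's fused step tracks A's dedup loop on the filtered remainder
theorem bucketStep_dko (item : String) (m : String → Bool) (fs : List String)
    (out : List String) (seen : PySem.Set String) (full : Bool)
    (hlt : full = false → (out.length : Int) < 12) :
    (let r := bucketStep item (m item) out seen full
     (if full then out else dkoLoop ((item :: fs).filter m) out seen 12)
       = (if r.2.2 then r.1 else dkoLoop (fs.filter m) r.1 r.2.1 12)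
       ∧ (r.2.2 = false → (r.1.length : Int) < 12)) := by
  cases full with
  | true => simp [bucketStep]
  | false =>
    have hlen := hlt rfl
    cases hm : m item with
    | false => simp [bucketStep, hm, hlt]
    | true =>
      simp only [List.filter_cons, hm, reduceIte, Bool.false_eq_true, if_false]
      rw [bucketStep_true, dkoLoop_cons]
      by_cases hval : normalizeB item = ""
      · simp [hval, hlt]
      · cases hseen : PySem.Set.contains seen (PySem.Str.lower (normalizeB item)) with
        | true => simp [hval, hlt]
        | false => simp [hval]


-- the fused loop equals the pair of dedup loops over the filtered remainders
theorem fuse_eq (items : List String) (svc : List String) (seenS : PySem.Set String) (sFull : Bool)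
    (att : List String) (seenA : PySem.Set String) (aFull : Bool)
    (hs : sFull = false → (svc.length : Int) < 12) (ha : aFull = false → (att.length : Int) < 12) :
    fuseLoop items svc seenS sFull att seenA aFull
      = ((if sFull then svc else dkoLoop (items.filter matchS) svc seenS 12),
         (if aFull then att else dkoLoop (items.filter matchA) att seenA 12)) := by
  induction items generalizing svc seenS sFull att seenA aFull with
  | nil =>
    cases sFull <;> cases aFull <;> simp [fuseLoop, dkoLoop]
  | cons item rest ih =>
    have h1 := bucketStep_dko item matchS rest svc seenS sFull hs
    have h2 := bucketStep_dko item matchA rest att seenA aFull ha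
    simp only at h1 h2
    obtain ⟨e1, l1⟩ := h1
    obtain ⟨e2, l2⟩ := h2
    simp only [fuseLoop, matchS, matchA] at *
    set r1 := bucketStep item (serviceWords.any fun w => PySem.Str.isIn w (PySem.Str.lower item)) svc seenS sFull with hr1
    set r2 := bucketStep item (attachWords.any fun w => PySem.Str.isIn w (PySem.Str.lower item)) att seenA aFull with hr2
    by_cases hb : r1.2.2 = true ∧ r2.2.2 = true
    · simp [hb.1, hb.2, e1, e2]
    · have hcond : (r1.2.2 && r2.2.2) = false := by
        cases c1 : r1.2.2 <;> cases c2 : r2.2.2 <;> simp_all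
      simp only [hcond, Bool.false_eq_true, if_false]
      rw [ih r1.1 r1.2.1 r1.2.2 r2.1 r2.2.1 r2.2.2 (fun h => l1 h) (fun h => l2 h)]
      rw [e1, e2]

-- ===== VERDICT (by name: the statement is the Claim_ definition above) =====
theorem split_service_and_attachments_spec : Claim_equal_split_service_and_attachments := by
  intro items _
  unfold Spec_split_service_and_attachments split_service_and_attachments split_service_and_attachments_alt dedup_keep_order
  simp only [classify_eq items [] [], List.nil_append]
  rw [fuse_eq items [] PySem.Set.empty false [] PySem.Set.empty false (by intro; simp) (by intro; simp)]
  simp
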